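-- pv_equiv track=rewrite | github.com/ShubhamKumartamu/Cambricon-D_Baseline_Comp_Arch | CambriconD/cambriconD_MAC.py | multiplier_group
-- ===== SOURCE A (Python) =====
-- def multiplier_group(quantized_activations, weights, overflow_flags, m, int_max_value=2**31 - 1, int_min_value=-2**31):
--     result = 0
--     outlier_count = 0
--     for i in range(len(quantized_activations)):
--         if not overflow_flags[i]:  # Inlier (integer activation)
--             result += quantized_activations[i] * weights[i]
--         else:  # Outlier (floating-point activation)
--             if outlier_count < m:
--                 result += quantized_activations[i] * weights[i]
--                 outlier_count += 1
--             else: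
--                 result += (int_max_value if quantized_activations[i] > 0 else int_min_value) * weights[i]
--     return result
-- ===== SOURCE B (Python) =====
-- def multiplier_group(quantized_activations, weights, overflow_flags, m, int_max_value=2**31 - 1, int_min_value=-2**31):
--     # Baseline weighted dot product over ALL activations, then correct only the
--     # clamped outliers (those past the first max(m, 0) flagged positions) by
--     # adding (clamp_value - q) * w, which turns q*w into clamp_value*w.
--     total = sum(q * wt for q, wt in zip(quantized_activations, weights))
--     outliers = [i for i, f in enumerate(overflow_flags[:len(quantized_activations)]) if f]
--     for i in outliers[max(m, 0):]:
--         clamp = int_max_value if quantized_activations[i] > 0 else int_min_value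
--         total += (clamp - quantized_activations[i]) * weights[i]
--     return total
-- ===== Notes on version B (the rewrite author's own statement) =====
-- stated objective: alternative
-- what changed: B first computes the plain weighted dot product of all activations with no branching, then adds a correction term (clamp_value - q[i]) * w[i] only for the outlier indices past the first max(m,0), instead of A's single loop that branches per element and maintains a mutable outlier counter.
import Mathlib
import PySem

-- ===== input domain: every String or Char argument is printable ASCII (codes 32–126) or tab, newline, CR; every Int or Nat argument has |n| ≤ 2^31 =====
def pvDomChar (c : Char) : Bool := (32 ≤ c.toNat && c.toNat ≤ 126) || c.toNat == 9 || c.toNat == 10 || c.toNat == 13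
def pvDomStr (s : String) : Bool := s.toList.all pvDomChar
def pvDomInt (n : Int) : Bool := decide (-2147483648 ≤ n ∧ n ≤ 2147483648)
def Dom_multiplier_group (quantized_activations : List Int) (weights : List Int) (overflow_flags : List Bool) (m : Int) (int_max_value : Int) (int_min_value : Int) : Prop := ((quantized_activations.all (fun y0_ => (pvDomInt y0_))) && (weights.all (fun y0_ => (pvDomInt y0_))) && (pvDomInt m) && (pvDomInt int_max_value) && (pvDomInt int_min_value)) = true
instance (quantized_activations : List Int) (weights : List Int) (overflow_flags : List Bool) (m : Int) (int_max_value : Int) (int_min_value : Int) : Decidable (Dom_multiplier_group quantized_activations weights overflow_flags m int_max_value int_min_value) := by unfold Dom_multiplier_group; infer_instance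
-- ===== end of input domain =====

-- B replaces A's single branching loop with a mutable outlier counter by a plain weighted dot
-- product over all activations followed by a correction pass over only the clamped outlier
-- indices (objective: alternative decomposition, same O(n) cost). Return value only; no mutation.

-- ===== PORT A =====
-- single loop; state = (result, outlier_count)
def multiplier_group (quantized_activations : List Int) (weights : List Int) (overflow_flags : List Bool) (m : Int) (int_max_value : Int) (int_min_value : Int) : Int :=
  ((List.range quantized_activations.length).foldl
    (fun (st : Int × Int) i =>
      if !(overflow_flags.getD i false) then
        (st.1 + quantized_activations.getD i 0 * weights.getD i 0, st.2)
      else if st.2 < m then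
        (st.1 + quantized_activations.getD i 0 * weights.getD i 0, st.2 + 1)
      else
        (st.1 + (if quantized_activations.getD i 0 > 0 then int_max_value else int_min_value) * weights.getD i 0, st.2))
    (0, 0)).1

-- ===== PORT B =====
-- [i for i, f in enumerate(overflow_flags[:len(quantized_activations)]) if f]
-- (the nonnegative-bound slice fl[:n] is List.take n, exact)
def mgOutliers (quantized_activations : List Int) (overflow_flags : List Bool) : List Int :=
  ((PySem.List.enumerate (overflow_flags.take quantized_activations.length) 0).filter (fun p => p.2)).map (fun p => p.1)

def multiplier_group_alt (quantized_activations : List Int) (weights : List Int) (overflow_flags : List Bool) (m : Int) (int_max_value : Int) (int_min_value : Int) : Int :=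
  let total := (quantized_activations.zip weights).foldl (fun t p => t + p.1 * p.2) 0
  -- outliers[max(m, 0):]  (nonnegative-start slice = drop, exact)
  ((mgOutliers quantized_activations overflow_flags).drop (max m 0).toNat).foldl
    (fun t i =>
      t + ((if PySem.List.pyGetD quantized_activations i 0 > 0 then int_max_value else int_min_value)
            - PySem.List.pyGetD quantized_activations i 0) * PySem.List.pyGetD weights i 0)
    total

-- ===== PRECONDITION & SPEC =====
-- Pre_ excludes exactly the inputs where Python A raises IndexError: weights or overflow_flags
-- shorter than quantized_activations.
def Pre_multiplier_group (quantized_activations : List Int) (weights : List Int) (overflow_flags : List Bool) (m : Int) (int_max_value : Int) (int_min_value : Int) : Prop :=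
  quantized_activations.length ≤ weights.length ∧ quantized_activations.length ≤ overflow_flags.length
instance (quantized_activations : List Int) (weights : List Int) (overflow_flags : List Bool) (m : Int) (int_max_value : Int) (int_min_value : Int) : Decidable (Pre_multiplier_group quantized_activations weights overflow_flags m int_max_value int_min_value) := by unfold Pre_multiplier_group; infer_instance
def pvWitness_multiplier_group : List Int × List Int × List Bool × Int × Int × Int :=
  ([1, -2], [3, 4], [true, false], 1, 2147483647, -2147483648)
def Spec_multiplier_group (quantized_activations : List Int) (weights : List Int) (overflow_flags : List Bool) (m : Int) (int_max_value : Int) (int_min_value : Int) (out : Int) : Prop := out = multiplier_group_alt quantized_activations weights overflow_flags m int_max_value int_min_value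
instance (quantized_activations : List Int) (weights : List Int) (overflow_flags : List Bool) (m : Int) (int_max_value : Int) (int_min_value : Int) (out : Int) : Decidable (Spec_multiplier_group quantized_activations weights overflow_flags m int_max_value int_min_value out) := by unfold Spec_multiplier_group; infer_instance

-- ===== CLAIM (what is proved, stated in full; the proofs are below) =====
def Claim_equal_multiplier_group : Prop := ∀ (quantized_activations : List Int) (weights : List Int) (overflow_flags : List Bool) (m : Int) (int_max_value : Int) (int_min_value : Int), Dom_multiplier_group quantized_activations weights overflow_flags m int_max_value int_min_value → Pre_multiplier_group quantized_activations weights overflow_flags m int_max_value int_min_value → Spec_multiplier_group quantized_activations weights overflow_flags m int_max_value int_min_value (multiplier_group quantized_activations weights overflow_flags m int_max_value int_min_value)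

-- ===== LEMMAS AND PROOFS =====

-- B's enumerate/filter/map index list equals the filtered Nat range, cast to Int
lemma mg_outliers_eq (fl : List Bool) : ∀ (s : Nat),
    ((PySem.List.enumerate fl (s : Int)).filter (fun p => p.2)).map (fun p => p.1)
      = ((List.range fl.length).filter (fun j => fl.getD j false)).map (fun j => ((s + j : Nat) : Int)) := by
  induction fl with
  | nil => intro s; simp [PySem.List.enumerate]
  | cons x xs ih =>
    intro s
    have ih' := ih (s + 1)
    rw [PySem.List.enumerate_cons, List.length_cons, List.range_succ_eq_map]
    push_cast at ih' ⊢
    simp only [List.filter_cons, List.filter_map]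
    cases x with
    | false =>
      simp only [List.getD_cons_zero, Bool.false_eq_true]
      simp [ih', List.map_map, Function.comp_def]
      intro a _ _; ring
    | true =>
      simp [ih', List.map_map, Function.comp_def]
      intro a _ _; ring

-- the zip dot product equals the range-indexed dot product (lengths compatible)
lemma mg_zip_eq (qa w : List Int) (h : qa.length ≤ w.length) :
    (qa.zip w).foldl (fun t p => t + p.1 * p.2) 0
      = (List.range qa.length).foldl (fun t i => t + qa.getD i 0 * w.getD i 0) 0 := by
  rw [PySem.List.foldl_add, PySem.List.foldl_add, zero_add, zero_add]
  congr 1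
  apply List.ext_getElem
  · simp [Nat.min_eq_left h]
  · intro i h1 h2
    simp only [List.getElem_map, List.getElem_zip, List.getElem_range]
    simp at h1
    rw [List.getD_eq_getElem _ _ (by omega), List.getD_eq_getElem _ _ (by omega)]

-- the loop invariant: A's state after n steps is
-- (sum of per-index terms a i over the prefix + correction (b i - a i) over the clamped
--  flagged indices < n, min(#flagged seen, max(m,0)))
lemma mg_inv (p : Nat → Bool) (a b : Nat → Int) (m : Int) :
    ∀ (n : Nat),
    (List.range n).foldl
      (fun (st : Int × Int) i =>
        if !(p i) then (st.1 + a i, st.2)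
        else if st.2 < m then (st.1 + a i, st.2 + 1)
        else (st.1 + b i, st.2))
      (0, 0)
    = ((List.range n).foldl (fun t i => t + a i) 0
        + ((((List.range n).filter p).drop (max m 0).toNat).foldl
            (fun t i => t + (b i - a i)) 0),
       ((min (((List.range n).filter p).length) (max m 0).toNat : Nat) : Int)) := by
  intro n
  induction n with
  | zero => simp
  | succ n ih =>
    rw [List.range_succ, List.foldl_append, List.foldl_append, ih,
        List.foldl_cons, List.foldl_cons, List.foldl_nil, List.foldl_nil,
        List.filter_append]
    set cnt := ((List.range n).filter p).length with hcnt
    set M := (max m 0).toNat with hM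
    have hMm : (M : Int) = max m 0 := by
      rw [hM]; exact Int.toNat_of_nonneg (le_max_right m 0)
    by_cases hp : p n
    · have hfil : List.filter p [n] = [n] := by
        rw [List.filter_cons, if_pos hp, List.filter_nil]
      rw [hfil]
      by_cases hlt : cnt < M
      · have hm : ((min cnt M : Nat) : Int) < m := by
          have h0 : 0 < M := by omega
          have hmp : 0 < m := by
            by_contra hh
            have : max m 0 = 0 := by omega
            omega
          have : (M : Int) = m := by rw [hMm]; omega
          have : ((min cnt M : Nat) : Int) = (cnt : Int) := by push_cast; omega
          omega
        have hd1 : (((List.range n).filter p).drop M) = [] :=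
          List.drop_eq_nil_of_le (by omega)
        have hd2 : ((((List.range n).filter p) ++ [n]).drop M) = [] :=
          List.drop_eq_nil_of_le (by simp; omega)
        simp only [hp, Bool.not_true, Bool.false_eq_true, if_false, if_pos hm, hd1, hd2,
          List.foldl_nil]
        rw [Prod.mk.injEq]
        have hlen1 : (List.filter p (List.range n) ++ [n]).length = cnt + 1 := by simp [hcnt]
        refine ⟨by ring, by rw [hlen1]; push_cast; omega⟩
      · have hm : ¬ ((min cnt M : Nat) : Int) < m := by
          have h1 : (min cnt M : Nat) = M := by omega
          rw [h1, hMm]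
          omega
        have hd : ((((List.range n).filter p) ++ [n]).drop M)
            = (((List.range n).filter p).drop M) ++ [n] :=
          List.drop_append_of_le_length (by omega)
        simp only [hp, Bool.not_true, Bool.false_eq_true, if_false, if_neg hm, hd,
          List.foldl_append, List.foldl_cons, List.foldl_nil]
        rw [Prod.mk.injEq]
        refine ⟨by ring, by simp [List.length_append]; omega⟩
    · have hpf : p n = false := by revert hp; cases p n <;> simp
      have hfil : List.filter p [n] = [] := by
        rw [List.filter_cons, if_neg (by simp [hpf]), List.filter_nil]
      rw [hfil, List.append_nil]
      simp only [hpf, Bool.not_false, if_true]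
      rw [Prod.mk.injEq]
      exact ⟨by ring, rfl⟩

-- ===== VERDICT (by name: the statement is the Claim_ definition above) =====
theorem multiplier_group_spec : Claim_equal_multiplier_group := by
  intro qa w fl m imax imin _ hpre
  unfold Spec_multiplier_group multiplier_group multiplier_group_alt
  rw [mg_inv (fun i => fl.getD i false) (fun i => qa.getD i 0 * w.getD i 0)
        (fun i => (if qa.getD i 0 > 0 then imax else imin) * w.getD i 0) m qa.length]
  rw [mg_zip_eq qa w hpre.1]
  have hout : mgOutliers qa fl
      = ((List.range qa.length).filter (fun j => fl.getD j false)).map (fun j => ((j : Nat) : Int)) := by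
    unfold mgOutliers
    rw [show ((0 : Int)) = ((0 : Nat) : Int) by norm_num, mg_outliers_eq (fl.take qa.length) 0]
    have hlen : (fl.take qa.length).length = qa.length := by
      simp [List.length_take, Nat.min_eq_left hpre.2]
    rw [hlen]
    have hfc : ∀ j ∈ List.range qa.length,
        ((List.take qa.length fl).getD j false) = (fl.getD j false) := by
      intro j hj
      rw [List.mem_range] at hj
      simp [List.getD_eq_getElem?_getD, hj]
    rw [List.filter_congr hfc]
    simp
  rw [hout, ← List.map_drop, List.foldl_map]
  simp only [PySem.List.pyGetD_natCast]
  rw [PySem.List.foldl_add, PySem.List.foldl_add, PySem.List.foldl_add]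
  congr 1
  rw [zero_add]
  exact congrArg List.sum (List.map_congr_left (fun i _ => by ring))
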